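-- pv_equiv track=rewrite | github.com/Pandaemonium/CosmicUnderground | minigames/dance/chart.py | _kick_beats_from_pattern
-- ===== SOURCE A (Python) =====
-- from typing import List, Dict, Tuple, Optional
--
-- def _kick_beats_from_pattern(pattern: str, beats_per_bar: int) -> List[int]:
--     """Pattern like '1__1' → indices [0,3] in a 4/4; stretches/loops if beats_per_bar != len(pattern)."""
--     if beats_per_bar <= 0: return [0]
--     out = []
--     if not pattern:
--         pattern = "1___"
--     for i in range(beats_per_bar):
--         ch = pattern[i % len(pattern)]
--         if ch == "1":
--             out.append(i)
--     return out
-- ===== SOURCE B (Python) =====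
-- def _kick_beats_from_pattern(pattern: str, beats_per_bar: int):
--     if beats_per_bar <= 0:
--         return [0]
--     if not pattern:
--         pattern = "1___"
--     L = len(pattern)
--     positions = [j for j, ch in enumerate(pattern) if ch == "1"]
--     full, rem = divmod(beats_per_bar, L)
--     out = [c * L + p for c in range(full) for p in positions]
--     out.extend(full * L + p for p in positions if p < rem)
--     return out
-- ===== Notes on version B (the rewrite author's own statement) =====
-- stated objective: alternative
-- what changed: B scans the pattern once into a list of '1' offsets and tiles it arithmetically over the full/remainder cycles given by divmod, instead of testing every beat index with a modulo lookup; same cost overall.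
import Mathlib
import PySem

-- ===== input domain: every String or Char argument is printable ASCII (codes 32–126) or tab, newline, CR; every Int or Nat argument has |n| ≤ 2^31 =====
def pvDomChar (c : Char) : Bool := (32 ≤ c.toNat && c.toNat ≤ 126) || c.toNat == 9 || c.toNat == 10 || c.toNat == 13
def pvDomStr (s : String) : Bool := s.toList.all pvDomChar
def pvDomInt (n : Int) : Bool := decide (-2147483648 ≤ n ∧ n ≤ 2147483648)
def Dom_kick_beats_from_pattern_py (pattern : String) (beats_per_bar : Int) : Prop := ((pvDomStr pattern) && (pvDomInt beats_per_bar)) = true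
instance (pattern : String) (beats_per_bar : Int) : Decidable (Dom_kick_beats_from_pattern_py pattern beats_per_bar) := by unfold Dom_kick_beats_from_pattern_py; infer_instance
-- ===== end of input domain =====

-- B builds the pattern's '1'-offset index once and tiles it over divmod cycles instead of testing every beat with a modulo (alternative decomposition; same output).

-- ===== PORT A =====
-- literal transliteration of A: guard, default pattern, loop over range(beats_per_bar)
-- testing pattern[i % len(pattern)] == '1' and appending i.
def kick_beats_from_pattern_py (pattern : String) (beats_per_bar : Int) : List Int :=
  if beats_per_bar ≤ 0 then [0]
  else
    let pat := if pattern = "" then "1___" else pattern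
    (PySem.List.pyRange 0 beats_per_bar 1).foldl
      (fun out i =>
        match PySem.Str.pyGet? pat (PySem.Int.mod i (PySem.Str.len pat)) with
        | some ch => if ch = '1' then out ++ [i] else out
        | none => out)   -- unreachable: 0 ≤ i % len < len, so indexing never fails
      []

-- ===== PORT B =====
-- literal transliteration of B: same two guards, positions = offsets of '1',
-- full, rem = divmod(beats_per_bar, L), tile positions over full cycles, add the partial cycle.
def kick_beats_from_pattern_py_alt (pattern : String) (beats_per_bar : Int) : List Int :=
  if beats_per_bar ≤ 0 then [0]
  else
    let pat := if pattern = "" then "1___" else pattern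
    let L : Int := PySem.Str.len pat
    let positions : List Int :=
      ((PySem.List.enumerate pat.toList 0).filter (fun p => p.2 = '1')).map (·.1)
    let full : Int := PySem.Int.floordiv beats_per_bar L
    let rem : Int := PySem.Int.mod beats_per_bar L
    ((PySem.List.pyRange 0 full 1).flatMap (fun c => positions.map (fun p => c * L + p)))
      ++ (positions.filter (fun p => p < rem)).map (fun p => full * L + p)

-- ===== PRECONDITION & SPEC =====
def Spec_kick_beats_from_pattern_py (pattern : String) (beats_per_bar : Int) (out : List Int) : Prop := out = kick_beats_from_pattern_py_alt pattern beats_per_bar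
instance (pattern : String) (beats_per_bar : Int) (out : List Int) : Decidable (Spec_kick_beats_from_pattern_py pattern beats_per_bar out) := by unfold Spec_kick_beats_from_pattern_py; infer_instance

-- ===== CLAIM (what is proved, stated in full; the proofs are below) =====
def Claim_equal_kick_beats_from_pattern_py : Prop := ∀ (pattern : String) (beats_per_bar : Int), Dom_kick_beats_from_pattern_py pattern beats_per_bar → Spec_kick_beats_from_pattern_py pattern beats_per_bar (kick_beats_from_pattern_py pattern beats_per_bar)

-- ===== LEMMAS AND PROOFS =====

-- Core Nat-level tiling lemma: filtering range (f*L) by a predicate of k % L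
-- equals tiling the filtered offsets of range L over f cycles.
theorem filter_range_mul (P0 : Nat → Bool) (L : Nat) (f : Nat) :
    (List.range (f * L)).filter (fun k => P0 (k % L)) =
      (List.range f).flatMap (fun c => ((List.range L).filter P0).map (fun p => c * L + p)) := by
  induction f with
  | zero => simp
  | succ f ih =>
    have hsplit : List.range ((f + 1) * L) = List.range (f * L) ++ (List.range L).map (fun k => f * L + k) := by
      rw [Nat.succ_mul, List.range_add]
    rw [hsplit, List.filter_append, ih, List.range_succ, List.flatMap_append]
    simp only [List.flatMap_cons, List.flatMap_nil, List.append_nil]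
    congr 1
    rw [List.filter_map]
    congr 1
    apply List.filter_congr
    intro j hj
    simp only [Function.comp_apply]
    have h1 : (f * L + j) % L = j := by
      rw [Nat.add_comm, Nat.add_mul_mod_self_right]
      exact Nat.mod_eq_of_lt (List.mem_range.mp hj)
    rw [h1]

theorem filter_range_lt (P0 : Nat → Bool) (L r : Nat) (hr : r ≤ L) :
    ((List.range L).filter P0).filter (fun p => decide (p < r)) = (List.range r).filter P0 := by
  rw [List.filter_comm]
  congr 1
  induction L with
  | zero => simp [Nat.le_zero.mp hr]
  | succ L ih =>
    rcases Nat.lt_or_ge r (L + 1) with h | h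
    · have hr' : r ≤ L := Nat.lt_succ_iff.mp h
      rw [List.range_succ, List.filter_append, ih hr']
      simp [Nat.not_lt.mpr hr']
    · have hrL : r = L + 1 := le_antisymm hr h
      subst hrL
      rw [List.filter_eq_self.mpr]
      intro a ha
      simpa using List.mem_range.mp ha

-- Full Nat-level statement covering the remainder block too.
theorem filter_range_div_mod (P0 : Nat → Bool) (L : Nat) (hL : 0 < L) (n : Nat) :
    (List.range n).filter (fun k => P0 (k % L)) =
      (List.range (n / L)).flatMap (fun c => ((List.range L).filter P0).map (fun p => c * L + p))
        ++ (((List.range L).filter P0).filter (fun p => decide (p < n % L))).map (fun p => n / L * L + p) := by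
  have hn : n = n / L * L + n % L := (Nat.div_add_mod' n L).symm
  rw [filter_range_lt P0 L (n % L) (le_of_lt (Nat.mod_lt n hL))]
  conv_lhs => rw [hn]
  rw [List.range_add, List.filter_append, filter_range_mul P0 L, List.filter_map]
  congr 1
  congr 1
  apply List.filter_congr
  intro j hj
  simp only [Function.comp_apply]
  have h1 : (n / L * L + j) % L = j % L := by
    rw [Nat.add_comm, Nat.add_mul_mod_self_right]
  have hjL : j < L := lt_of_lt_of_le (List.mem_range.mp hj) (le_of_lt (Nat.mod_lt n hL))
  rw [h1, Nat.mod_eq_of_lt hjL]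

-- positions computed from enumerate equal the Nat-level filtered range, cast to Int.
theorem positions_eq (cs : List Char) :
    ((PySem.List.enumerate cs 0).filter (fun p => decide (p.2 = '1'))).map (·.1) =
      ((List.range cs.length).filter (fun j => decide (cs[j]? = some '1'))).map (fun j : Nat => (j : Int)) := by
  rw [PySem.List.enumerate_eq_map_pyRange cs ' ']
  have hlen : PySem.List.len cs = (cs.length : Int) := by simp
  rw [hlen, PySem.List.pyRange_zero_natCast, List.map_map, List.filter_map, List.map_map]
  have hf : (List.range cs.length).filter ((fun p : Int × Char => decide (p.2 = '1')) ∘ ((fun j : Int => (j, PySem.List.pyGetD cs j ' ')) ∘ (fun k : Nat => (k : Int)))) =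
      (List.range cs.length).filter (fun j => decide (cs[j]? = some '1')) := by
    apply List.filter_congr
    intro j hj
    have hjl : j < cs.length := List.mem_range.mp hj
    simp only [Function.comp_apply, PySem.List.pyGetD_natCast]
    rw [List.getD_eq_getElem _ _ hjl, List.getElem?_eq_getElem hjl]
    simp
  rw [hf]
  apply List.map_congr_left
  intro j _
  simp

theorem kick_main (pat : String) (b : Int) (hb : 0 < b) (hpat : pat.toList ≠ []) :
    (PySem.List.pyRange 0 b 1).foldl
      (fun out i =>
        match PySem.Str.pyGet? pat (PySem.Int.mod i (PySem.Str.len pat)) with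
        | some ch => if ch = '1' then out ++ [i] else out
        | none => out) [] =
    ((PySem.List.pyRange 0 (PySem.Int.floordiv b (PySem.Str.len pat)) 1).flatMap
        (fun c => (((PySem.List.enumerate pat.toList 0).filter (fun p => p.2 = '1')).map (·.1)).map
          (fun p => c * (PySem.Str.len pat) + p)))
      ++ ((((PySem.List.enumerate pat.toList 0).filter (fun p => p.2 = '1')).map (·.1)).filter
            (fun p => p < PySem.Int.mod b (PySem.Str.len pat))).map
          (fun p => (PySem.Int.floordiv b (PySem.Str.len pat)) * (PySem.Str.len pat) + p) := by
  have hLn : 0 < pat.toList.length := List.length_pos_iff.mpr hpat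
  have hlen : PySem.Str.len pat = (pat.toList.length : Int) := by simp
  obtain ⟨n, hn⟩ : ∃ n : Nat, b = (n : Int) := ⟨b.toNat, (Int.toNat_of_nonneg hb.le).symm⟩
  subst hn
  have hbody : (fun (out : List Int) (i : Int) =>
        match PySem.Str.pyGet? pat (PySem.Int.mod i (PySem.Str.len pat)) with
        | some ch => if ch = '1' then out ++ [i] else out
        | none => out) =
      (fun out i => if PySem.Str.pyGet? pat (PySem.Int.mod i (PySem.Str.len pat)) = some '1'
        then out ++ [i] else out) := by
    funext out i
    cases h : PySem.Str.pyGet? pat (PySem.Int.mod i (PySem.Str.len pat)) with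
    | none => simp
    | some ch => by_cases hc : ch = '1' <;> simp [hc]
  rw [hbody, PySem.List.foldl_append_ite_eq_filter, List.nil_append,
      PySem.List.pyRange_zero_natCast, List.filter_map]
  have hpred : ((fun i => decide (PySem.Str.pyGet? pat (PySem.Int.mod i (PySem.Str.len pat)) = some '1')) ∘ (fun k : Nat => (k : Int))) =
      fun k => decide (pat.toList[(k % pat.toList.length)]? = some '1') := by
    funext k
    simp only [Function.comp_apply, hlen, PySem.Int.mod_natCast, PySem.Str.pyGet?_natCast]
  rw [hpred, filter_range_div_mod (fun j => decide (pat.toList[j]? = some '1')) pat.toList.length hLn n,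
      List.map_append]
  rw [positions_eq pat.toList, hlen, PySem.Int.floordiv_natCast, PySem.Int.mod_natCast,
      PySem.List.pyRange_zero_natCast]
  congr 1
  · simp only [List.map_flatMap, List.flatMap_map, List.map_map]
    congr 1
  · rw [List.filter_map]
    have hlt : ((fun p : Int => decide (p < ((n % pat.toList.length : Nat) : Int))) ∘ (fun j : Nat => (j : Int))) =
        fun j : Nat => decide (j < n % pat.toList.length) := by
      funext j
      simp only [Function.comp_apply, decide_eq_decide]
      exact Nat.cast_lt
    rw [hlt, List.map_map, List.map_map]
    apply List.map_congr_left
    intro p _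
    simp only [Function.comp_apply]
    push_cast
    ring

-- ===== VERDICT (by name: the statement is the Claim_ definition above) =====
theorem kick_beats_from_pattern_py_spec : Claim_equal_kick_beats_from_pattern_py := by
  intro pattern b _
  unfold Spec_kick_beats_from_pattern_py kick_beats_from_pattern_py kick_beats_from_pattern_py_alt
  by_cases hb : b ≤ 0
  · simp [hb]
  · simp only [hb, if_false]
    have hpos : 0 < b := lt_of_not_ge hb
    have hne : (if pattern = "" then "1___" else pattern).toList ≠ [] := by
      by_cases h : pattern = ""
      · simp [h]
      · rw [if_neg h]
        simpa [String.toList_eq_nil_iff] using h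
    exact kick_main _ b hpos hne
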